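-- pv_equiv track=rewrite | github.com/Shreyasranveer08/AtmosLofi- | backend/services/ai_service.py | _infer_mood_from_tags
-- ===== SOURCE A (Python) =====
-- def _infer_mood_from_tags(tags: list) -> str:
--     """Map MusicBrainz tags to lofi mood labels."""
--     tags_lower = [t.lower() for t in tags]
--
--     sad_words    = ["sad", "melancholic", "heartbreak", "longing", "bittersweet", "grief", "dard"]
--     happy_words  = ["happy", "energetic", "dance", "upbeat", "festive", "joy", "khushi"]
--     calm_words   = ["calm", "chill", "peaceful", "ambient", "relax", "sleep", "lo-fi", "lofi"]
--     romantic_words = ["love", "romantic", "romance", "pyaar", "ishq", "romance"]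
--
--     for word in sad_words:
--         if any(word in tag for tag in tags_lower):
--             return "Sad"
--     for word in romantic_words:
--         if any(word in tag for tag in tags_lower):
--             return "Romantic"
--     for word in happy_words:
--         if any(word in tag for tag in tags_lower):
--             return "Happy"
--     for word in calm_words:
--         if any(word in tag for tag in tags_lower):
--             return "Calm"
--
--     return "Neutral"
-- ===== SOURCE B (Python) =====
-- def _infer_mood_from_tags(tags: list) -> str:
--     """Map MusicBrainz tags to lofi mood labels."""
--     groups = [
--         ("Sad", ["sad", "melancholic", "heartbreak", "longing", "bittersweet", "grief", "dard"]),
--         ("Romantic", ["love", "romantic", "romance", "pyaar", "ishq", "romance"]),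
--         ("Happy", ["happy", "energetic", "dance", "upbeat", "festive", "joy", "khushi"]),
--         ("Calm", ["calm", "chill", "peaceful", "ambient", "relax", "sleep", "lo-fi", "lofi"]),
--     ]
--     found = set()
--     for tag in tags:
--         t = tag.lower()
--         for mood, words in groups:
--             if any(w in t for w in words):
--                 found.add(mood)
--     for mood in ("Sad", "Romantic", "Happy", "Calm"):
--         if mood in found:
--             return mood
--     return "Neutral"
-- ===== Notes on version B (the rewrite author's own statement) =====
-- stated objective: alternative
-- what changed: Single pass over the tags accumulating every matched mood category into a set, then one priority selection at the end, instead of four sequential short-circuiting group-by-group scans over all tags.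
import Mathlib
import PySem

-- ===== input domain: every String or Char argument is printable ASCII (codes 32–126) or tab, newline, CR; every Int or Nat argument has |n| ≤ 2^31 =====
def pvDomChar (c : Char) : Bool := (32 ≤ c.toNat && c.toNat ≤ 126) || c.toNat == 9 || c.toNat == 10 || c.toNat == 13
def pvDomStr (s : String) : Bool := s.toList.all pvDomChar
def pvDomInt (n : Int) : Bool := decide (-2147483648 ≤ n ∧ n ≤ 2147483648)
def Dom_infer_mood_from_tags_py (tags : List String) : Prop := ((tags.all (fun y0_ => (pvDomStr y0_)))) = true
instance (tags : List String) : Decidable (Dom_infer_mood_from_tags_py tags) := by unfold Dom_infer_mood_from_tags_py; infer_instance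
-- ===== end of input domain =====

-- B accumulates every matched mood category into a set in one pass over the tags and
-- selects by priority afterwards, instead of A's four sequential group-by-group scans.

-- ===== PORT A =====
def sadWords : List String := ["sad", "melancholic", "heartbreak", "longing", "bittersweet", "grief", "dard"]
def happyWords : List String := ["happy", "energetic", "dance", "upbeat", "festive", "joy", "khushi"]
def calmWords : List String := ["calm", "chill", "peaceful", "ambient", "relax", "sleep", "lo-fi", "lofi"]
def romanticWords : List String := ["love", "romantic", "romance", "pyaar", "ishq", "romance"]

-- 'for word in ws: if any(word in tag for tag in tags_lower): return label' — the loop as a fold that stops at the first hit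
def groupScan (ws : List String) (tagsLower : List String) : Bool :=
  ws.any (fun word => tagsLower.any (fun tag => PySem.Str.isIn word tag))

def infer_mood_from_tags_py (tags : List String) : String :=
  let tagsLower := tags.map PySem.Str.lower
  if groupScan sadWords tagsLower then "Sad"
  else if groupScan romanticWords tagsLower then "Romantic"
  else if groupScan happyWords tagsLower then "Happy"
  else if groupScan calmWords tagsLower then "Calm"
  else "Neutral"

-- ===== PORT B =====
def moodGroups : List (String × List String) :=
  [("Sad", ["sad", "melancholic", "heartbreak", "longing", "bittersweet", "grief", "dard"]),
   ("Romantic", ["love", "romantic", "romance", "pyaar", "ishq", "romance"]),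
   ("Happy", ["happy", "energetic", "dance", "upbeat", "festive", "joy", "khushi"]),
   ("Calm", ["calm", "chill", "peaceful", "ambient", "relax", "sleep", "lo-fi", "lofi"])]

def addMoodsForTag (acc : PySem.Set String) (tag : String) : PySem.Set String :=
  let t := PySem.Str.lower tag
  moodGroups.foldl (fun acc2 g =>
    if g.2.any (fun w => PySem.Str.isIn w t) then PySem.Set.add acc2 g.1 else acc2) acc

def infer_mood_from_tags_py_alt (tags : List String) : String :=
  let found : PySem.Set String := tags.foldl addMoodsForTag PySem.Set.empty
  if PySem.Set.contains found "Sad" then "Sad"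
  else if PySem.Set.contains found "Romantic" then "Romantic"
  else if PySem.Set.contains found "Happy" then "Happy"
  else if PySem.Set.contains found "Calm" then "Calm"
  else "Neutral"

-- ===== PRECONDITION & SPEC =====
def Spec_infer_mood_from_tags_py (tags : List String) (out : String) : Prop := out = infer_mood_from_tags_py_alt tags
instance (tags : List String) (out : String) : Decidable (Spec_infer_mood_from_tags_py tags out) := by unfold Spec_infer_mood_from_tags_py; infer_instance

-- ===== CLAIM (what is proved, stated in full; the proofs are below) =====
def Claim_equal_infer_mood_from_tags_py : Prop := ∀ (tags : List String), Dom_infer_mood_from_tags_py tags → Spec_infer_mood_from_tags_py tags (infer_mood_from_tags_py tags)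

-- ===== LEMMAS AND PROOFS =====

-- a tag hits a word group
def tagHits (ws : List String) (tag : String) : Bool :=
  ws.any (fun w => PySem.Str.isIn w (PySem.Str.lower tag))

theorem mem_foldl_groups (p : String × List String → Bool) (gs : List (String × List String))
    (acc : PySem.Set String) (m : String) :
    m ∈ gs.foldl (fun a g => if p g then PySem.Set.add a g.1 else a) acc ↔
      m ∈ acc ∨ ∃ g ∈ gs, g.1 = m ∧ p g = true := by
  induction gs generalizing acc with
  | nil => simp
  | cons g gs ih =>
      simp only [List.foldl_cons, ih, List.mem_cons]
      by_cases hp : p g = true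
      · rw [if_pos hp]
        simp only [PySem.Set.mem_add]
        constructor
        · rintro ((h | rfl) | h)
          · exact Or.inl h
          · exact Or.inr ⟨g, Or.inl rfl, rfl, hp⟩
          · obtain ⟨u, hu, hm, hpu⟩ := h; exact Or.inr ⟨u, Or.inr hu, hm, hpu⟩
        · rintro (h | ⟨u, (rfl | hu), rfl, hpu⟩)
          · exact Or.inl (Or.inl h)
          · exact Or.inl (Or.inr rfl)
          · exact Or.inr ⟨u, hu, rfl, hpu⟩
      · rw [if_neg hp]
        constructor
        · rintro (h | ⟨u, hu, hm, hpu⟩)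
          · exact Or.inl h
          · exact Or.inr ⟨u, Or.inr hu, hm, hpu⟩
        · rintro (h | ⟨u, (rfl | hu), rfl, hpu⟩)
          · exact Or.inl h
          · exact absurd hpu hp
          · exact Or.inr ⟨u, hu, rfl, hpu⟩

theorem mem_addMoodsForTag (acc : PySem.Set String) (tag : String) (m : String) :
    m ∈ addMoodsForTag acc tag ↔
      m ∈ acc ∨ ∃ g ∈ moodGroups, g.1 = m ∧ tagHits g.2 tag = true := by
  simp only [tagHits]
  exact mem_foldl_groups (fun g => g.2.any (fun w => PySem.Str.isIn w (PySem.Str.lower tag)))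
    moodGroups acc m

theorem mem_fold_found (tags : List String) (acc : PySem.Set String) (m : String) :
    m ∈ tags.foldl addMoodsForTag acc ↔
      m ∈ acc ∨ ∃ t ∈ tags, ∃ g ∈ moodGroups, g.1 = m ∧ tagHits g.2 t = true := by
  induction tags generalizing acc with
  | nil => simp
  | cons t ts ih =>
      simp only [List.foldl_cons, ih, mem_addMoodsForTag, List.mem_cons]
      constructor
      · rintro ((h | h) | h)
        · exact Or.inl h
        · exact Or.inr ⟨t, Or.inl rfl, h⟩
        · obtain ⟨u, hu, hg⟩ := h; exact Or.inr ⟨u, Or.inr hu, hg⟩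
      · rintro (h | ⟨u, (rfl | hu), hg⟩)
        · exact Or.inl (Or.inl h)
        · exact Or.inl (Or.inr hg)
        · exact Or.inr ⟨u, hu, hg⟩

theorem found_contains (tags : List String) (m : String) :
    PySem.Set.contains (tags.foldl addMoodsForTag PySem.Set.empty) m = true ↔
      ∃ g ∈ moodGroups, g.1 = m ∧ ∃ t ∈ tags, tagHits g.2 t = true := by
  rw [PySem.Set.contains_iff, mem_fold_found]
  simp [PySem.Set.empty]
  tauto

theorem groupScan_eq (ws : List String) (tags : List String) :
    groupScan ws (tags.map PySem.Str.lower) = tags.any (tagHits ws) := by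
  rw [Bool.eq_iff_iff]
  simp only [groupScan, tagHits, List.any_map, List.any_eq_true, Function.comp]
  constructor
  · rintro ⟨w, hw, t, ht, h⟩; exact ⟨t, ht, w, hw, h⟩
  · rintro ⟨t, ht, w, hw, h⟩; exact ⟨w, hw, t, ht, h⟩

-- ===== VERDICT (by name: the statement is the Claim_ definition above) =====
theorem infer_mood_from_tags_py_spec : Claim_equal_infer_mood_from_tags_py := by
  intro tags _
  show _ = _
  simp only [infer_mood_from_tags_py, infer_mood_from_tags_py_alt, groupScan_eq]
  have hc : ∀ m ws, (∀ g ∈ moodGroups, g.1 = m → g.2 = ws) → (∃ g ∈ moodGroups, g.1 = m) →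
      (PySem.Set.contains (tags.foldl addMoodsForTag PySem.Set.empty) m = tags.any (tagHits ws)) := by
    intro m ws huniq hex
    rw [Bool.eq_iff_iff, found_contains, List.any_eq_true]
    constructor
    · rintro ⟨g, hg, rfl, t, ht, h⟩; rw [huniq g hg rfl] at h; exact ⟨t, ht, h⟩
    · rintro ⟨t, ht, h⟩
      obtain ⟨g, hg, hm⟩ := hex
      exact ⟨g, hg, hm, t, ht, by rw [huniq g hg hm]; exact h⟩
  rw [hc "Sad" sadWords (by decide) (by decide),
      hc "Romantic" romanticWords (by decide) (by decide),
      hc "Happy" happyWords (by decide) (by decide),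
      hc "Calm" calmWords (by decide) (by decide)]
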